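-- pv_equiv track=rewrite | github.com/sjogleka/General_codes | optimalUtilization.py | find
-- ===== SOURCE A (Python) =====
-- def find(F, B, T):
--     ans = [0, 0, 0]
--     F = sorted([x, i] for i, x in F)
--     for idy, y in B:
--         f = 0
--         end = len(F)
--         z = T - y
--         while f != end:
--             m = (int)((f + end) / 2)
--             if F[m][0] <= z:
--                 f = m + 1
--             else:
--                 end = m
--         if f != 0 and y + F[f - 1][0] > ans[0]:
--             ans = [y + F[f - 1][0], F[f - 1][1], idy]
--     return ans[1:]
-- ===== SOURCE B (Python) =====
-- def find(F, B, T):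
--     ans = [0, 0, 0]
--     for idy, y in B:
--         z = T - y
--         best = None
--         for i, x in F:
--             if x <= z and (best is None or (x, i) > best):
--                 best = (x, i)
--         if best is not None and y + best[0] > ans[0]:
--             ans = [y + best[0], best[1], idy]
--     return ans[1:]
-- ===== Notes on version B (the rewrite author's own statement) =====
-- stated objective: simpler
-- what changed: Replaced sorting F plus a hand-written binary search per query by a direct linear scan of F per query that keeps the lexicographically largest (value, index) pair not exceeding T - y.
import Mathlib
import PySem

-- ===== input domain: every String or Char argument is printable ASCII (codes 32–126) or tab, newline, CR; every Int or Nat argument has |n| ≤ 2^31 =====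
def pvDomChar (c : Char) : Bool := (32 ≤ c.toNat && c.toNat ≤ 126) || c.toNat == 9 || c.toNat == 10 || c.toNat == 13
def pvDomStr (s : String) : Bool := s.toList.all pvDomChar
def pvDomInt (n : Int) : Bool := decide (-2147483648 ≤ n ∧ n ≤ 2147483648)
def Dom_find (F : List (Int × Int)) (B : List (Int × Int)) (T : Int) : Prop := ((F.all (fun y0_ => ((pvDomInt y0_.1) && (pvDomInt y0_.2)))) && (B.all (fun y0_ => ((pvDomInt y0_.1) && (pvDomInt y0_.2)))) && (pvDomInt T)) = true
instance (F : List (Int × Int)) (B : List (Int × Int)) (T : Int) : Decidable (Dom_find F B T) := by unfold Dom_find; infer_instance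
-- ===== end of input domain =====

-- B replaces A's sort + per-query binary search by a plain linear scan of F keeping the
-- lexicographically largest (value, index) candidate; same return value, simpler code.


-- ===== PORT A =====
-- the while-loop of A's binary search; fuel only makes it total (the loop runs at most
-- e - f times).  'm = (int)((f+end)/2)' is ported as floor division: f and e are
-- nonnegative machine-small ints here, so Python's float division is exact and int()
-- truncation coincides with floor.
def bsLoop (Fs : List (Int × Int)) (z : Int) (f e : Int) : Nat → Int
  | 0 => f
  | fuel + 1 =>
    if f ≠ e then
      let m := PySem.Int.floordiv (f + e) 2
      match PySem.List.pyGet? Fs m with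
      | some p => if p.1 ≤ z then bsLoop Fs z (m + 1) e fuel else bsLoop Fs z f m fuel
      | none => f          -- IndexError: unreachable, indices stay in range
    else f

-- the body of A's 'for idy, y in B' loop
def stepA (Fs : List (Int × Int)) (T : Int) (ans : Int × Int × Int) (py : Int × Int) : Int × Int × Int :=
  let idy := py.1
  let y := py.2
  let z := T - y
  let f := bsLoop Fs z 0 (Fs.length : Int) (Fs.length + 1)
  if f ≠ 0 then
    match PySem.List.pyGet? Fs (f - 1) with
    | some q => if y + q.1 > ans.1 then (y + q.1, q.2, idy) else ans
    | none => ans          -- unreachable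
  else ans

def find (F : List (Int × Int)) (B : List (Int × Int)) (T : Int) : List Int :=
  -- 'sorted([x, i] for i, x in F)': Python sorts the two-element lists lexicographically,
  -- i.e. a stable sort by the lexicographic key (x, i).
  let Fs := PySem.List.sorted (F.map (fun p => (p.2, p.1))) (fun q => (toLex (q.1, q.2) : Int ×ₗ Int))
  let ans := B.foldl (stepA Fs T) (0, 0, 0)
  [ans.2.1, ans.2.2]

-- ===== PORT B =====
-- the body of B's 'for idy, y in B' loop; 'best is None or (x, i) > best' is Python's
-- lexicographic tuple comparison, written out on the components
def stepB (F : List (Int × Int)) (T : Int) (ans : Int × Int × Int) (py : Int × Int) : Int × Int × Int :=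
  let idy := py.1
  let y := py.2
  let z := T - y
  let best := F.foldl (fun (best : Option (Int × Int)) (q : Int × Int) =>
    if q.2 ≤ z then
      match best with
      | none => some (q.2, q.1)
      | some b => if b.1 < q.2 ∨ (b.1 = q.2 ∧ b.2 < q.1) then some (q.2, q.1) else best
    else best) none
  match best with
  | some b => if y + b.1 > ans.1 then (y + b.1, b.2, idy) else ans
  | none => ans

def find_alt (F : List (Int × Int)) (B : List (Int × Int)) (T : Int) : List Int :=
  let ans := B.foldl (stepB F T) (0, 0, 0)
  [ans.2.1, ans.2.2]

-- ===== PRECONDITION & SPEC =====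
def Spec_find (F : List (Int × Int)) (B : List (Int × Int)) (T : Int) (out : List Int) : Prop := out = find_alt F B T
instance (F : List (Int × Int)) (B : List (Int × Int)) (T : Int) (out : List Int) : Decidable (Spec_find F B T out) := by unfold Spec_find; infer_instance

-- ===== CLAIM (what is proved, stated in full; the proofs are below) =====
def Claim_equal_find : Prop := ∀ (F : List (Int × Int)) (B : List (Int × Int)) (T : Int), Dom_find F B T → Spec_find F B T (find F B T)

-- ===== LEMMAS AND PROOFS =====

-- proof-only helpers: the lexicographic key and the lex-max fold step
def pvKey (q : Int × Int) : Int ×ₗ Int := toLex (q.1, q.2)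

def pvMaxo (b : Option (Int × Int)) (q : Int × Int) : Option (Int × Int) :=
  match b with
  | none => some q
  | some x => if x.1 < q.1 ∨ (x.1 = q.1 ∧ x.2 < q.2) then some q else b

lemma pvKey_lt_iff (x q : Int × Int) :
    (x.1 < q.1 ∨ (x.1 = q.1 ∧ x.2 < q.2)) ↔ pvKey x < pvKey q := by
  simp [pvKey, Prod.Lex.toLex_lt_toLex]

lemma pvKey_le_fst {x q : Int × Int} (h : pvKey x ≤ pvKey q) : x.1 ≤ q.1 := by
  rcases (Prod.Lex.toLex_le_toLex).1 h with h | h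
  · exact le_of_lt h
  · exact le_of_eq h.1

lemma pvKey_inj {x q : Int × Int} (h : pvKey x = pvKey q) : x = q := by
  have := toLex.injective h
  cases x; cases q; simpa using this

-- B's inner fold is the lex-max fold over the filtered swapped list
lemma inner_fold_eq (F : List (Int × Int)) (z : Int) (acc : Option (Int × Int)) :
    F.foldl (fun (best : Option (Int × Int)) (q : Int × Int) =>
      if q.2 ≤ z then
        match best with
        | none => some (q.2, q.1)
        | some b => if b.1 < q.2 ∨ (b.1 = q.2 ∧ b.2 < q.1) then some (q.2, q.1) else best
      else best) acc
    = ((F.map (fun p => (p.2, p.1))).filter (fun q => decide (q.1 ≤ z))).foldl pvMaxo acc := by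
  rw [List.foldl_filter, List.foldl_map]
  congr 1
  funext b p
  by_cases h : p.2 ≤ z <;> simp [h, pvMaxo]

lemma fold_maxo_some (l : List (Int × Int)) (b : Int × Int) :
    ∃ m, l.foldl pvMaxo (some b) = some m ∧ (m = b ∨ m ∈ l) ∧ pvKey b ≤ pvKey m ∧
      ∀ q ∈ l, pvKey q ≤ pvKey m := by
  induction l generalizing b with
  | nil => exact ⟨b, rfl, Or.inl rfl, le_refl _, by simp⟩
  | cons q t ih =>
    by_cases h : b.1 < q.1 ∨ (b.1 = q.1 ∧ b.2 < q.2)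
    · obtain ⟨m, hm, hmem, hle, hall⟩ := ih q
      refine ⟨m, ?_, ?_, ?_, ?_⟩
      · simpa [pvMaxo, h] using hm
      · rcases hmem with h' | h' <;> simp [h']
      · exact le_trans (le_of_lt ((pvKey_lt_iff b q).1 h)) hle
      · intro r hr
        rcases List.mem_cons.1 hr with h' | h'
        · subst h'; exact hle
        · exact hall r h'
    · obtain ⟨m, hm, hmem, hle, hall⟩ := ih b
      refine ⟨m, ?_, ?_, hle, ?_⟩
      · simpa [pvMaxo, h] using hm
      · rcases hmem with h' | h' <;> simp [h']
      · intro r hr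
        rcases List.mem_cons.1 hr with h' | h'
        · subst h'
          have : ¬ pvKey b < pvKey r := fun hc => h ((pvKey_lt_iff b r).2 hc)
          exact le_trans (le_of_not_gt this) hle
        · exact hall r h'

lemma fold_maxo_ne_nil (l : List (Int × Int)) (hl : l ≠ []) :
    ∃ m, l.foldl pvMaxo none = some m ∧ m ∈ l ∧ ∀ q ∈ l, pvKey q ≤ pvKey m := by
  cases l with
  | nil => exact absurd rfl hl
  | cons q t =>
    obtain ⟨m, hm, hmem, hle, hall⟩ := fold_maxo_some t q
    refine ⟨m, hm, ?_, ?_⟩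
    · rcases hmem with h' | h' <;> simp [h']
    · intro r hr
      rcases List.mem_cons.1 hr with h' | h'
      · subst h'; exact hle
      · exact hall r h'

-- a list whose first components are nondecreasing answers 'value ≤ z' exactly on the
-- first countP indices
lemma pairwise_index_char (Fs : List (Int × Int)) (z : Int)
    (hp : Fs.Pairwise (fun a b => a.1 ≤ b.1)) :
    ∀ j (hj : j < Fs.length),
      (Fs[j].1 ≤ z ↔ j < Fs.countP (fun q => decide (q.1 ≤ z))) := by
  induction Fs with
  | nil => intro j hj; simp at hj
  | cons q t ih =>
    rw [List.pairwise_cons] at hp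
    intro j hj
    rw [List.countP_cons]
    by_cases hq : q.1 ≤ z
    · cases j with
      | zero => simp [hq]
      | succ j =>
        have := ih hp.2 j (by simpa using hj)
        simp only [List.getElem_cons_succ]
        simp [hq] at this ⊢
        omega
    · have ht0 : t.countP (fun q => decide (q.1 ≤ z)) = 0 := by
        apply List.countP_eq_zero.mpr
        intro x hx
        simp only [decide_eq_true_eq]
        have := hp.1 x hx
        omega
      cases j with
      | zero => simp [hq, ht0]
      | succ j =>
        have hjt : j < t.length := by simpa using hj
        have hxt : ¬ t[j].1 ≤ z := by
          have := hp.1 t[j] (List.getElem_mem hjt)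
          omega
        simp [hq, ht0, hxt]

-- A's binary-search loop computes the number of elements ≤ z of the sorted list
lemma bsLoop_eq (Fs : List (Int × Int)) (z : Int) (c : Nat) (hc : c ≤ Fs.length)
    (hchar : ∀ j (hj : j < Fs.length), (Fs[j].1 ≤ z ↔ j < c)) :
    ∀ fuel (f e : Int), 0 ≤ f → f ≤ (c : Int) → (c : Int) ≤ e → e ≤ (Fs.length : Int) →
      (e - f).toNat ≤ fuel → bsLoop Fs z f e fuel = (c : Int) := by
  intro fuel
  induction fuel with
  | zero =>
    intro f e h0 h1 h2 h3 h4
    simp only [bsLoop]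
    omega
  | succ fuel ih =>
    intro f e h0 h1 h2 h3 h4
    by_cases hfe : f = e
    · simp only [bsLoop, hfe, ne_eq, not_true_eq_false, if_false]
      omega
    · have h2' : PySem.Int.floordiv (f + e) 2 = (f + e) / 2 :=
        PySem.Int.floordiv_eq_ediv_of_pos (by norm_num)
      have hm0 : 0 ≤ (f + e) / 2 := by omega
      have hm1 : (f + e) / 2 < (Fs.length : Int) := by omega
      have hget : PySem.List.pyGet? Fs ((f + e) / 2) = some Fs[((f + e) / 2).toNat] :=
        PySem.List.pyGet?_eq_some_getElem Fs hm0 hm1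
      simp only [bsLoop, hfe, ne_eq, not_false_eq_true, if_true, h2', hget]
      have hjl : ((f + e) / 2).toNat < Fs.length := by omega
      by_cases hz : Fs[((f + e) / 2).toNat].1 ≤ z
      · have hlt : ((f + e) / 2).toNat < c := (hchar _ hjl).1 hz
        simp only [hz, if_true]
        exact ih ((f + e) / 2 + 1) e (by omega) (by omega) h2 h3 (by omega)
      · have hge : ¬ ((f + e) / 2).toNat < c := fun hlt => hz ((hchar _ hjl).2 hlt)
        simp only [hz, if_false]
        exact ih f ((f + e) / 2) h0 h1 (by omega) (by omega) (by omega)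

-- the lex-max of the filtered list is the last element of the ≤ z prefix of the sorted list
lemma max_eq (L : List (Int × Int)) (z : Int)
    (hc : (PySem.List.sorted L (fun q => (toLex (q.1, q.2) : Int ×ₗ Int))).countP
        (fun q => decide (q.1 ≤ z)) ≠ 0)
    (hlt : (PySem.List.sorted L (fun q => (toLex (q.1, q.2) : Int ×ₗ Int))).countP
        (fun q => decide (q.1 ≤ z)) - 1
        < (PySem.List.sorted L (fun q => (toLex (q.1, q.2) : Int ×ₗ Int))).length) :
    (L.filter (fun q => decide (q.1 ≤ z))).foldl pvMaxo none =
      some ((PySem.List.sorted L (fun q => (toLex (q.1, q.2) : Int ×ₗ Int)))[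
        (PySem.List.sorted L (fun q => (toLex (q.1, q.2) : Int ×ₗ Int))).countP
          (fun q => decide (q.1 ≤ z)) - 1]'hlt) := by
  set K : (Int × Int) → Int ×ₗ Int := fun q => (toLex (q.1, q.2) : Int ×ₗ Int) with hK
  set Fs := PySem.List.sorted L K with hFs
  set pz : (Int × Int) → Bool := fun q => decide (q.1 ≤ z) with hpz
  set c := Fs.countP pz with hcdef
  have hc' : c ≠ 0 := hc
  have hlt' : c - 1 < Fs.length := hlt
  have hps : Fs.Pairwise (fun a b => a.1 ≤ b.1) :=
    (PySem.List.sorted_pairwise L K).imp (fun h => pvKey_le_fst h)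
  have hchar : ∀ j (hj : j < Fs.length), (Fs[j].1 ≤ z ↔ j < c) :=
    pairwise_index_char Fs z hps
  have hperm : (Fs.filter pz).Perm (L.filter pz) :=
    (PySem.List.sorted_perm L K false).filter pz
  have hlen : (L.filter pz).length = c := by
    rw [← hperm.length_eq, hcdef]
    exact List.countP_eq_length_filter.symm
  have hnil : L.filter pz ≠ [] := by
    intro h; exact hc' (by rw [← hlen, h]; rfl)
  obtain ⟨m, hm, hmem, hall⟩ := fold_maxo_ne_nil _ hnil
  set M := Fs[c-1]'hlt with hM
  have hMz : M.1 ≤ z := (hchar (c-1) hlt).2 (by omega)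
  have hMmem : M ∈ L.filter pz := by
    apply hperm.mem_iff.1
    exact List.mem_filter.2 ⟨List.getElem_mem hlt, by simp [hpz, hMz]⟩
  have hmM : pvKey m ≤ pvKey M := by
    have hmF : m ∈ Fs.filter pz := hperm.mem_iff.2 hmem
    obtain ⟨hmFs, hpzm⟩ := List.mem_filter.1 hmF
    obtain ⟨j, hj, hje⟩ := List.mem_iff_getElem.1 hmFs
    have hjz : Fs[j].1 ≤ z := by rw [hje]; simpa [hpz] using hpzm
    have hjc : j < c := (hchar j hj).1 hjz
    have := PySem.List.key_sorted_getElem_mono L K (p := j) (q := c - 1) (by omega) hlt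
    rw [hje] at this
    exact this
  have hMm : pvKey M ≤ pvKey m := hall M hMmem
  rw [hm, hM]
  exact congrArg some (pvKey_inj (le_antisymm hmM hMm))

-- the two per-query loop bodies agree
lemma step_eq (F : List (Int × Int)) (T : Int) :
    stepA (PySem.List.sorted (F.map (fun p => (p.2, p.1)))
      (fun q => (toLex (q.1, q.2) : Int ×ₗ Int))) T = stepB F T := by
  funext ans py
  simp only [stepA, stepB]
  rw [inner_fold_eq]
  set z := T - py.2 with hz
  set L := F.map (fun p => (p.2, p.1)) with hL
  set K : (Int × Int) → Int ×ₗ Int := fun q => (toLex (q.1, q.2) : Int ×ₗ Int) with hK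
  set Fs := PySem.List.sorted L K with hFs
  set pz : (Int × Int) → Bool := fun q => decide (q.1 ≤ z) with hpz
  set c := Fs.countP pz with hcdef
  have hcl : c ≤ Fs.length := List.countP_le_length
  have hps : Fs.Pairwise (fun a b => a.1 ≤ b.1) :=
    (PySem.List.sorted_pairwise L K).imp (fun h => pvKey_le_fst h)
  have hchar : ∀ j (hj : j < Fs.length), (Fs[j].1 ≤ z ↔ j < c) :=
    pairwise_index_char Fs z hps
  have hbs : bsLoop Fs z 0 (Fs.length : Int) (Fs.length + 1) = (c : Int) :=
    bsLoop_eq Fs z c hcl hchar (Fs.length + 1) 0 (Fs.length : Int)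
      le_rfl (by omega) (by omega) le_rfl (by omega)
  rw [hbs]
  by_cases hc : c = 0
  · have hnil : L.filter pz = [] := by
      have hlen : (L.filter pz).length = c := by
        rw [← ((PySem.List.sorted_perm L K false).filter pz).length_eq, hcdef]
        exact List.countP_eq_length_filter.symm
      exact List.eq_nil_of_length_eq_zero (by omega)
    rw [hnil]
    simp [hc]
  · have hc1 : 1 ≤ c := Nat.one_le_iff_ne_zero.2 hc
    have hlt : c - 1 < Fs.length := by omega
    have hmax := max_eq L z hc hlt
    rw [hmax]
    have hidx : (c : Int) - 1 = ((c - 1 : Nat) : Int) := by omega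
    have hget : PySem.List.pyGet? Fs ((c : Int) - 1) = some (Fs[c-1]'hlt) := by
      rw [hidx, PySem.List.pyGet?_natCast]
      exact List.getElem?_eq_getElem hlt
    rw [hget]
    simp [hc]
    try rfl

theorem find_eq_find_alt (F B : List (Int × Int)) (T : Int) : find F B T = find_alt F B T := by
  simp only [find, find_alt, step_eq]

-- ===== VERDICT (by name: the statement is the Claim_ definition above) =====
theorem find_spec : Claim_equal_find := by
  intro F B T _
  unfold Spec_find
  exact find_eq_find_alt F B T
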